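-- pv_equiv track=rewrite | github.com/bardia-mhd/C4B_APR | data_directory/2830_problem_id/105055_author_id/Accepted.py | find_success_hack_count
-- ===== SOURCE A (Python) =====
-- def get_win_places(scores):
--     res = []
--     k = (scores//50)%475
--     for _ in range(25):
--         k = (k * 96 + 42)%475
--         res.append(26 + k)
--     return res
--
-- def find_success_hack_count(place, current_scores, min_goal):
--     """
--     >>> find_success_hack_count(239, 10880, 9889)
--     0
--     >>> find_success_hack_count(26, 7258, 6123)
--     2
--     >>> find_success_hack_count(493, 8000, 8000)
--     24
--     >>> find_success_hack_count(101, 6800, 6500)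
--     0
--     >>> find_success_hack_count(329, 19913, 19900)
--     8
--     """
--     goal = min_goal
--     while True:
--         if not (current_scores-goal)%50:
--             if place in get_win_places(goal):
--                 break
--         goal += 1
--     return (max(0, goal-current_scores)+50)//100
-- ===== SOURCE B (Python) =====
-- def find_success_hack_count(place, current_scores, min_goal):
--     # Search over the 475-cycle of k-residues directly, stepping goals by 50
--     # (only goals congruent to current_scores mod 50 can ever match).
--     t = place - 26
--     g0 = min_goal + (current_scores - min_goal) % 50
--     k0 = (g0 // 50) % 475
--     for j in range(475):
--         k = (k0 + j) % 475
--         for _ in range(25):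
--             k = (k * 96 + 42) % 475
--             if k == t:
--                 goal = g0 + 50 * j
--                 return (max(0, goal - current_scores) + 50) // 100
-- ===== Notes on version B (the rewrite author's own statement) =====
-- stated objective: alternative
-- what changed: B jumps straight to the first goal congruent to current_scores mod 50 and then scans the 475-periodic cycle of k-residues in 50-point strides (at most 475 bounded iterations with an early-exit 25-step LCG check), instead of A's unbounded unit-step while-loop that rebuilds a 25-element win-place list at every multiple of 50; it trades A's unbounded scan for a bounded residue scan.
import Mathlib
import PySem

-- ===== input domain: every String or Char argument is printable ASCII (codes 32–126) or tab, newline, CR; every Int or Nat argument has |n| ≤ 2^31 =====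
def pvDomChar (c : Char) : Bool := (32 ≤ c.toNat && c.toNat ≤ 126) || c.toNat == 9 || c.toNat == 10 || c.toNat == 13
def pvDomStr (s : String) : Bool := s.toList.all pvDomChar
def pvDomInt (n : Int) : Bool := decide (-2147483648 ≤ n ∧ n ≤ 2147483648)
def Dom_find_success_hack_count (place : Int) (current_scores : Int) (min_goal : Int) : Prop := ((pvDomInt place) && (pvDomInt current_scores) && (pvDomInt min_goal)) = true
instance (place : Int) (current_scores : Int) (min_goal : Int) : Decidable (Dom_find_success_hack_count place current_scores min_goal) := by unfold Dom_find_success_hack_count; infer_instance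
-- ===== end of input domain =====

-- B scans the 475-periodic cycle of k-residues directly, stepping goals by 50 over the only
-- admissible residue class mod 50, instead of A's unit-step scan (objective: alternative bounded algorithm).


-- ===== PORT A =====
def get_win_places (scores : Int) : List Int :=
  let k := PySem.Int.mod (PySem.Int.floordiv scores 50) 475
  (((List.range 25).foldl (fun (st : List Int × Int) _ =>
      let k' := PySem.Int.mod (st.2 * 96 + 42) 475
      (st.1 ++ [26 + k'], k')) ([], k))).1

-- A's `while True` loop, fueled; under Pre_ the loop always breaks well inside the fuel.
def aLoop (place current_scores : Int) : Nat → Int → Int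
  | 0, goal => goal
  | n+1, goal =>
    if PySem.Int.mod (current_scores - goal) 50 = 0 ∧ place ∈ get_win_places goal
    then goal
    else aLoop place current_scores n (goal + 1)

def find_success_hack_count (place : Int) (current_scores : Int) (min_goal : Int) : Int :=
  let goal := aLoop place current_scores 24000 min_goal
  PySem.Int.floordiv (max 0 (goal - current_scores) + 50) 100

-- ===== PORT B =====
-- inner `for _ in range(25)` of Source B: does any of the next 25 LCG iterates from k equal t?
def bHit (t : Int) : Nat → Int → Bool
  | 0, _ => false
  | n+1, k =>
    let k' := PySem.Int.mod (k * 96 + 42) 475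
    if k' = t then true else bHit t n k'

-- outer `for j in range(475)` of Source B
def bFind (t k0 : Int) : Nat → Int → Option Int
  | 0, _ => none
  | n+1, j =>
    if bHit t 25 (PySem.Int.mod (k0 + j) 475) then some j
    else bFind t k0 n (j + 1)

def find_success_hack_count_alt (place : Int) (current_scores : Int) (min_goal : Int) : Int :=
  let t := place - 26
  let g0 := min_goal + PySem.Int.mod (current_scores - min_goal) 50
  let k0 := PySem.Int.mod (PySem.Int.floordiv g0 50) 475
  match bFind t k0 475 0 with
  | some j =>
      let goal := g0 + 50 * j
      PySem.Int.floordiv (max 0 (goal - current_scores) + 50) 100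
  | none => 0   -- Source B falls off the loop (returns None); excluded by Pre_

-- ===== PRECONDITION & SPEC =====
-- A's loop breaks (and Source B returns) iff place is a possible winning place 26 + k, k < 475;
-- outside this range A diverges (never returns), so exactly those inputs are excluded.
def Pre_find_success_hack_count (place : Int) (current_scores : Int) (min_goal : Int) : Prop :=
  26 ≤ place ∧ place ≤ 500

instance (place : Int) (current_scores : Int) (min_goal : Int) : Decidable (Pre_find_success_hack_count place current_scores min_goal) := by unfold Pre_find_success_hack_count; infer_instance

def pvWitness_find_success_hack_count : Int × Int × Int := (239, 10880, 9889)

def Spec_find_success_hack_count (place : Int) (current_scores : Int) (min_goal : Int) (out : Int) : Prop := out = find_success_hack_count_alt place current_scores min_goal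
instance (place : Int) (current_scores : Int) (min_goal : Int) (out : Int) : Decidable (Spec_find_success_hack_count place current_scores min_goal out) := by unfold Spec_find_success_hack_count; infer_instance

-- ===== CLAIM (what is proved, stated in full; the proofs are below) =====
def Claim_equal_find_success_hack_count : Prop := ∀ (place : Int) (current_scores : Int) (min_goal : Int), Dom_find_success_hack_count place current_scores min_goal → Pre_find_success_hack_count place current_scores min_goal → Spec_find_success_hack_count place current_scores min_goal (find_success_hack_count place current_scores min_goal)

-- ===== LEMMAS AND PROOFS =====

-- the LCG step k ↦ (96k + 42) mod 475
def pvF (k : Int) : Int := PySem.Int.mod (k * 96 + 42) 475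

-- the list A's foldl builds, expressed structurally
def pvGen : Nat → Int → List Int
  | 0, _ => []
  | n+1, k => (26 + pvF k) :: pvGen n (pvF k)

theorem pvMod50 (a : Int) : PySem.Int.mod a 50 = a % 50 :=
  PySem.Int.mod_eq_emod_of_pos (by norm_num)

theorem pvMod475 (a : Int) : PySem.Int.mod a 475 = a % 475 :=
  PySem.Int.mod_eq_emod_of_pos (by norm_num)

theorem pvFd50 (a : Int) : PySem.Int.floordiv a 50 = a / 50 :=
  PySem.Int.floordiv_eq_ediv_of_pos (by norm_num)

theorem pvFoldl_gen (l : List Nat) : ∀ (acc : List Int) (k : Int),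
    (l.foldl (fun (st : List Int × Int) _ =>
      let k' := PySem.Int.mod (st.2 * 96 + 42) 475
      (st.1 ++ [26 + k'], k')) (acc, k)).1 = acc ++ pvGen l.length k := by
  induction l with
  | nil => intro acc k; simp [pvGen]
  | cons a l ih =>
      intro acc k
      simp only [List.foldl_cons, List.length_cons, pvGen]
      rw [ih]
      simp [pvF]

theorem pvWin_eq (s : Int) :
    get_win_places s = pvGen 25 (PySem.Int.mod (PySem.Int.floordiv s 50) 475) := by
  have h := pvFoldl_gen (List.range 25) [] (PySem.Int.mod (PySem.Int.floordiv s 50) 475)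
  simpa [get_win_places] using h

theorem pvMem_gen_iff (place : Int) : ∀ (n : Nat) (k : Int),
    (place ∈ pvGen n k) ↔ bHit (place - 26) n k = true := by
  intro n
  induction n with
  | zero => intro k; simp [pvGen, bHit]
  | succ n ih =>
      intro k
      rw [pvGen, bHit]
      simp only [pvF, pvMod475, List.mem_cons]
      by_cases h : (k * 96 + 42) % 475 = place - 26
      · constructor
        · intro _; rw [if_pos h]
        · intro _; exact Or.inl (by omega)
      · rw [if_neg h, ← pvMod475 (k * 96 + 42), ← ih (PySem.Int.mod (k * 96 + 42) 475)]
        rw [pvMod475]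
        constructor
        · rintro (hc | hm)
          · omega
          · exact hm
        · exact Or.inr

-- A's loop skips m consecutive goals on which the break condition fails
theorem pvALoop_skip (place cs : Int) : ∀ (m fuel : Nat) (g : Int),
    (∀ i : Nat, i < m →
       ¬(PySem.Int.mod (cs - (g + i)) 50 = 0 ∧ place ∈ get_win_places (g + i))) →
    aLoop place cs (m + fuel) g = aLoop place cs fuel (g + m) := by
  intro m
  induction m with
  | zero => intro fuel g _; simp
  | succ m ih =>
      intro fuel g hno
      have h0 : ¬(PySem.Int.mod (cs - g) 50 = 0 ∧ place ∈ get_win_places g) := by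
        have := hno 0 (by omega); simpa using this
      rw [show m + 1 + fuel = (m + fuel) + 1 by omega, aLoop, if_neg h0]
      rw [ih fuel (g + 1) (by
        intro i hi
        have := hno (i + 1) (by omega)
        have hcast : g + 1 + (i : Int) = g + ((i : Nat) + 1 : Nat) := by push_cast; ring
        rw [hcast]; exact this)]
      congr 1
      push_cast; ring

-- main correspondence: B's residue scan computes exactly where A's unit-step loop breaks
theorem pvMain (place cs g0 k0 : Int)
    (hk0 : k0 = PySem.Int.mod (PySem.Int.floordiv g0 50) 475)
    (hg0 : PySem.Int.mod (cs - g0) 50 = 0) :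
    ∀ (n : Nat) (j jr : Int) (fuel : Nat), 0 ≤ j →
      bFind (place - 26) k0 n j = some jr → 50 * n ≤ fuel →
      aLoop place cs fuel (g0 + 50 * j) = g0 + 50 * jr := by
  intro n
  induction n with
  | zero => intro j jr fuel _ hfind _; simp [bFind] at hfind
  | succ n ih =>
      intro j jr fuel hj hfind hfuel
      -- the k-residue at goal g0 + 50*j
      have hkg : PySem.Int.mod (PySem.Int.floordiv (g0 + 50 * j) 50) 475
               = PySem.Int.mod (k0 + j) 475 := by
        rw [pvFd50, pvMod475, pvMod475, hk0, pvMod475, pvFd50]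
        have hdiv : (g0 + 50 * j) / 50 = g0 / 50 + j := by
          rw [show g0 + 50 * j = g0 + j * 50 by ring, Int.add_mul_ediv_right g0 j (by norm_num)]
        rw [hdiv]
        omega
      have hmemb : (place ∈ get_win_places (g0 + 50 * j))
          ↔ bHit (place - 26) 25 (PySem.Int.mod (k0 + j) 475) = true := by
        rw [pvWin_eq, pvMem_gen_iff, hkg]
      have hmod : PySem.Int.mod (cs - (g0 + 50 * j)) 50 = 0 := by
        rw [pvMod50]; rw [pvMod50] at hg0; omega
      rw [bFind] at hfind
      by_cases hhit : bHit (place - 26) 25 (PySem.Int.mod (k0 + j) 475) = true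
      · rw [if_pos hhit] at hfind
        obtain rfl : j = jr := by injection hfind
        obtain ⟨m, rfl⟩ : ∃ m, fuel = m + 1 := ⟨fuel - 1, by omega⟩
        rw [aLoop, if_pos ⟨hmod, hmemb.mpr hhit⟩]
      · rw [if_neg hhit] at hfind
        obtain ⟨m, rfl⟩ : ∃ m, fuel = 50 + m := ⟨fuel - 50, by omega⟩
        have hcond : ¬(PySem.Int.mod (cs - (g0 + 50 * j)) 50 = 0
            ∧ place ∈ get_win_places (g0 + 50 * j)) := by
          intro h; exact hhit (hmemb.mp h.2)
        rw [show 50 + m = (49 + m) + 1 by omega, aLoop, if_neg hcond]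
        have hskip := pvALoop_skip place cs 49 m (g0 + 50 * j + 1) (by
          intro i hi hcon
          rw [pvMod50] at hcon hg0
          have h1 : cs - (g0 + 50 * j + 1 + (i:Int)) = (cs - g0) - 50 * j - (1 + i) := by ring
          omega)
        rw [hskip]
        have hg' : g0 + 50 * j + 1 + (49:Nat) = g0 + 50 * (j + 1) := by push_cast; ring
        rw [hg']
        exact ih (j + 1) jr m (by omega) hfind (by omega)

-- if some residue within the window hits, bFind returns a value
theorem pvBFind_some (t k0 : Int) : ∀ (n : Nat) (j : Int),
    (∃ i : Nat, i < n ∧ bHit t 25 (PySem.Int.mod (k0 + (j + i)) 475) = true) →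
    (bFind t k0 n j).isSome := by
  intro n
  induction n with
  | zero => rintro j ⟨i, hi, _⟩; omega
  | succ n ih =>
      rintro j ⟨i, hi, hhit⟩
      rw [bFind]
      by_cases h : bHit t 25 (PySem.Int.mod (k0 + j) 475) = true
      · rw [if_pos h]; rfl
      · rw [if_neg h]
        apply ih (j + 1)
        rcases i with _ | i
        · exfalso; apply h; simpa using hhit
        · exact ⟨i, by omega, by
            have : k0 + (j + 1 + (i:Int)) = k0 + (j + ((i:Nat) + 1 : Nat)) := by push_cast; ring
            rw [this]; exact hhit⟩

-- a winning place in [26, 500] is hit in one LCG step from kstar = 381*(t-42) mod 475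
theorem pvKstar_hit (place : Int) (h26 : 26 ≤ place) (h500 : place ≤ 500) :
    bHit (place - 26) 25 (((place - 26) - 42) * 381 % 475) = true := by
  set t := place - 26 with ht
  have hstep : ((t - 42) * 381 % 475 * 96 + 42) % 475 = t := by omega
  rw [show (25:Nat) = 24 + 1 from rfl, bHit]
  simp only [pvMod475, hstep]
  simp

-- ===== VERDICT (by name: the statement is the Claim_ definition above) =====
theorem find_success_hack_count_spec : Claim_equal_find_success_hack_count := by
  unfold Claim_equal_find_success_hack_count
  intro place cs mg _ hpre
  obtain ⟨h26, h500⟩ := hpre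
  unfold Spec_find_success_hack_count
  simp only [find_success_hack_count, find_success_hack_count_alt]
  set t := place - 26 with ht
  set g0 := mg + PySem.Int.mod (cs - mg) 50 with hg0def
  set k0 := PySem.Int.mod (PySem.Int.floordiv g0 50) 475 with hk0def
  have hg0mod : PySem.Int.mod (cs - g0) 50 = 0 := by
    rw [pvMod50]; rw [hg0def, pvMod50]; omega
  -- existence: bFind succeeds within 475 steps
  have hsome : (bFind t k0 475 0).isSome := by
    apply pvBFind_some
    set kstar := (t - 42) * 381 % 475 with hkstar
    have hksb : 0 ≤ kstar ∧ kstar < 475 := by rw [hkstar]; omega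
    have hk0b : 0 ≤ k0 ∧ k0 < 475 := by rw [hk0def, pvMod475]; omega
    refine ⟨((kstar - k0) % 475).toNat, by omega, ?_⟩
    have harg : PySem.Int.mod (k0 + ((0:Int) + (((kstar - k0) % 475).toNat : Nat))) 475 = kstar := by
      rw [pvMod475]
      rw [show ((0:Int) + ((((kstar - k0) % 475).toNat : Nat) : Int)) = (kstar - k0) % 475 by omega]
      omega
    rw [harg, hkstar, ht]
    exact pvKstar_hit place h26 h500
  obtain ⟨jr, hjr⟩ := Option.isSome_iff_exists.mp hsome
  rw [hjr]
  -- A side: skip from mg up to g0, then follow B's residue scan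
  have hd : 0 ≤ PySem.Int.mod (cs - mg) 50 ∧ PySem.Int.mod (cs - mg) 50 < 50 := by
    rw [pvMod50]; omega
  set dn := (PySem.Int.mod (cs - mg) 50).toNat with hdn
  have hskip := pvALoop_skip place cs dn (24000 - dn) mg (by
    intro i hi hcon
    rw [pvMod50] at hcon
    rw [hdn, pvMod50] at hi
    rw [pvMod50] at hd
    omega)
  rw [show (24000:Nat) = dn + (24000 - dn) by omega, hskip]
  have hmg : mg + (dn:Int) = g0 + 50 * 0 := by
    rw [hg0def, hdn]; push_cast
    rw [pvMod50] at hd ⊢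
    omega
  rw [hmg]
  rw [pvMain place cs g0 k0 hk0def hg0mod 475 0 jr (24000 - dn) (by omega) hjr (by omega)]
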